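-- pv_equiv track=rewrite | github.com/Lyle-xub/OSN-NCS-private | system/utils.py | generate_square_coordinates
-- ===== SOURCE A (Python) =====
-- def generate_square_coordinates(canvas_size, square_size, pattern):
--     coordinates = []
--     y_offset = (canvas_size[1] - (len(pattern) * square_size)) // (len(pattern) + 1)
--     current_y = y_offset
--
--     for row in pattern:
--         if row == 0:
--             current_y += square_size + y_offset
--             continue
--         x_offset = (canvas_size[0] - (row * square_size)) // (row + 1)
--         current_x = x_offset
--
--         for _ in range(row):
--             coordinates.append((current_x, current_y))
--             current_x += square_size + x_offset
--
--         current_y += square_size + y_offset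
--
--     return coordinates
-- ===== SOURCE B (Python) =====
-- def generate_square_coordinates(canvas_size, square_size, pattern):
--     n = len(pattern)
--     y_offset = (canvas_size[1] - n * square_size) // (n + 1)
--     # Stage 1: memoize, per distinct row value, its list of x coordinates.
--     row_xs = {}
--     for row in pattern:
--         if row not in row_xs:
--             if row > 0:
--                 x_offset = (canvas_size[0] - row * square_size) // (row + 1)
--                 row_xs[row] = [x_offset + j * (square_size + x_offset) for j in range(row)]
--             else:
--                 row_xs[row] = []
--     # Stage 2: assemble, pairing each row's cached xs with that row's y.
--     out = []
--     for i, row in enumerate(pattern):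
--         y = y_offset + i * (square_size + y_offset)
--         out += [(x, y) for x in row_xs[row]]
--     return out
-- ===== Notes on version B (the rewrite author's own statement) =====
-- stated objective: alternative
-- what changed: Replaces A's single pass with threaded current_x/current_y accumulators by a two-stage algorithm: first a memo dict mapping each distinct row value to its x-coordinate list (built once, so repeated rows are never recomputed), then an assembly pass over enumerate(pattern) that pairs each cached x-list with that row's y computed from its index.
import Mathlib
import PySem

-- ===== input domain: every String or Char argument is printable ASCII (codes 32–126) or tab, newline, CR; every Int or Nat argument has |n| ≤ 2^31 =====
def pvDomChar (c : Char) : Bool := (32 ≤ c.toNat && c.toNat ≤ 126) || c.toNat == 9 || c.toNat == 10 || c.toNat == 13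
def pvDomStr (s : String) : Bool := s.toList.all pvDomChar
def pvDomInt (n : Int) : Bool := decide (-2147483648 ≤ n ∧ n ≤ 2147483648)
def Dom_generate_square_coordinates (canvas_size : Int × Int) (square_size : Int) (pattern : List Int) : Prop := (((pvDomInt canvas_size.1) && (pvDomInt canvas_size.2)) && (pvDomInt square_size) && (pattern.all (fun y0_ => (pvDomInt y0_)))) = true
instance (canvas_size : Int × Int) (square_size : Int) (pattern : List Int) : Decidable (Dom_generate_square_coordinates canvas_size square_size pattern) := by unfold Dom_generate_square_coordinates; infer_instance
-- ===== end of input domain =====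

-- B replaces A's single pass with threaded current_x/current_y accumulators by two stages: a memo
-- dict from each distinct row value to its x-coordinate list, then an assembly pass over
-- enumerate(pattern) pairing each cached x-list with that row's y (objective: alternative).

-- ===== PORT A =====
def generate_square_coordinates (canvas_size : Int × Int) (square_size : Int) (pattern : List Int) : List (Int × Int) :=
  let y_offset := PySem.Int.floordiv (canvas_size.2 - (pattern.length : Int) * square_size) ((pattern.length : Int) + 1)
  (pattern.foldl (fun (st : List (Int × Int) × Int) row =>
    if row = 0 then (st.1, st.2 + square_size + y_offset)
    else
      let x_offset := PySem.Int.floordiv (canvas_size.1 - row * square_size) (row + 1)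
      let inner := (PySem.List.pyRange 0 row 1).foldl
        (fun (st2 : List (Int × Int) × Int) _ => (st2.1 ++ [(st2.2, st.2)], st2.2 + square_size + x_offset))
        (st.1, x_offset)
      (inner.1, st.2 + square_size + y_offset)) ([], y_offset)).1

-- ===== PORT B =====
def generate_square_coordinates_alt (canvas_size : Int × Int) (square_size : Int) (pattern : List Int) : List (Int × Int) :=
  let n := (pattern.length : Int)
  let y_offset := PySem.Int.floordiv (canvas_size.2 - n * square_size) (n + 1)
  -- Stage 1: memoize, per distinct row value, its list of x coordinates.
  let row_xs : PySem.Dict Int (List Int) :=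
    pattern.foldl (fun d row =>
      if d.contains row then d
      else if row > 0 then
        let x_offset := PySem.Int.floordiv (canvas_size.1 - row * square_size) (row + 1)
        d.insert row ((PySem.List.pyRange 0 row 1).map (fun j => x_offset + j * (square_size + x_offset)))
      else d.insert row []) PySem.Dict.empty
  -- Stage 2: assemble, pairing each row's cached xs with that row's y.
  (PySem.List.enumerate pattern 0).foldl (fun out p =>
    let y := y_offset + p.1 * (square_size + y_offset)
    out ++ (row_xs.getD p.2 []).map (fun x => (x, y))) []

-- ===== PRECONDITION & SPEC =====
-- Pre_ excludes exactly the inputs where Python A raises ZeroDivisionError: a pattern entry -1 makes row + 1 = 0.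
def Pre_generate_square_coordinates (canvas_size : Int × Int) (square_size : Int) (pattern : List Int) : Prop :=
  (-1 : Int) ∉ pattern
instance (canvas_size : Int × Int) (square_size : Int) (pattern : List Int) : Decidable (Pre_generate_square_coordinates canvas_size square_size pattern) := by unfold Pre_generate_square_coordinates; infer_instance

def pvWitness_generate_square_coordinates : (Int × Int) × Int × List Int := ((20, 20), 2, [2, 0, 1])

def Spec_generate_square_coordinates (canvas_size : Int × Int) (square_size : Int) (pattern : List Int) (out : List (Int × Int)) : Prop := out = generate_square_coordinates_alt canvas_size square_size pattern
instance (canvas_size : Int × Int) (square_size : Int) (pattern : List Int) (out : List (Int × Int)) : Decidable (Spec_generate_square_coordinates canvas_size square_size pattern out) := by unfold Spec_generate_square_coordinates; infer_instance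

-- ===== CLAIM (what is proved, stated in full; the proofs are below) =====
def Claim_equal_generate_square_coordinates : Prop := ∀ (canvas_size : Int × Int) (square_size : Int) (pattern : List Int), Dom_generate_square_coordinates canvas_size square_size pattern → Pre_generate_square_coordinates canvas_size square_size pattern → Spec_generate_square_coordinates canvas_size square_size pattern (generate_square_coordinates canvas_size square_size pattern)

-- ===== LEMMAS AND PROOFS =====

-- A's inner 'for _ in range(row)' loop: the running current_x equals x + j*(ss+c) at step j.
lemma pv_inner_fold (y ss c : Int) :
    ∀ (l : List Int) (acc : List (Int × Int)) (x : Int),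
      (l.foldl (fun (st2 : List (Int × Int) × Int) _ => (st2.1 ++ [(st2.2, y)], st2.2 + ss + c)) (acc, x)).1
        = acc ++ (List.range l.length).map (fun (j : Nat) => (x + (j : Int) * (ss + c), y)) := by
  intro l
  induction l with
  | nil => intro acc x; simp
  | cons h t ih =>
      intro acc x
      simp only [List.foldl_cons, List.length_cons]
      rw [ih, List.range_succ_eq_map, List.map_cons, List.map_map,
        List.append_assoc, List.singleton_append]
      congr 1
      congr 1
      · simp
      · apply List.map_congr_left
        intro j _
        simp only [Function.comp, Prod.mk.injEq]
        constructor
        · push_cast; ring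
        · trivial

-- A's outer loop, generalized over the enumerate start s and the running current_y.
lemma pv_outer_fold (canvas_size : Int × Int) (square_size y_offset : Int) :
    ∀ (pat : List Int) (acc : List (Int × Int)) (s y : Int),
      (pat.foldl (fun (st : List (Int × Int) × Int) row =>
        if row = 0 then (st.1, st.2 + square_size + y_offset)
        else
          (((PySem.List.pyRange 0 row 1).foldl
            (fun (st2 : List (Int × Int) × Int) _ =>
              (st2.1 ++ [(st2.2, st.2)],
               st2.2 + square_size + PySem.Int.floordiv (canvas_size.1 - row * square_size) (row + 1)))
            (st.1, PySem.Int.floordiv (canvas_size.1 - row * square_size) (row + 1))).1,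
           st.2 + square_size + y_offset)) (acc, y)).1
      = acc ++ (PySem.List.enumerate pat s).flatMap (fun p =>
          if p.2 > 0 then
            (PySem.List.pyRange 0 p.2 1).map (fun j =>
              (PySem.Int.floordiv (canvas_size.1 - p.2 * square_size) (p.2 + 1) +
                 j * (square_size + PySem.Int.floordiv (canvas_size.1 - p.2 * square_size) (p.2 + 1)),
               y + (p.1 - s) * (square_size + y_offset)))
          else []) := by
  intro pat
  induction pat with
  | nil => intro acc s y; simp [PySem.List.enumerate]
  | cons row t ih =>
      intro acc s y
      rw [PySem.List.enumerate_cons]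
      simp only [List.foldl_cons, List.flatMap_cons]
      have hrest : ∀ (acc' : List (Int × Int)),
          (t.foldl (fun (st : List (Int × Int) × Int) row =>
            if row = 0 then (st.1, st.2 + square_size + y_offset)
            else
              (((PySem.List.pyRange 0 row 1).foldl
                (fun (st2 : List (Int × Int) × Int) _ =>
                  (st2.1 ++ [(st2.2, st.2)],
                   st2.2 + square_size + PySem.Int.floordiv (canvas_size.1 - row * square_size) (row + 1)))
                (st.1, PySem.Int.floordiv (canvas_size.1 - row * square_size) (row + 1))).1,
               st.2 + square_size + y_offset)) (acc', y + square_size + y_offset)).1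
          = acc' ++ (PySem.List.enumerate t (s + 1)).flatMap (fun p =>
              if p.2 > 0 then
                (PySem.List.pyRange 0 p.2 1).map (fun j =>
                  (PySem.Int.floordiv (canvas_size.1 - p.2 * square_size) (p.2 + 1) +
                     j * (square_size + PySem.Int.floordiv (canvas_size.1 - p.2 * square_size) (p.2 + 1)),
                   y + (p.1 - s) * (square_size + y_offset)))
              else []) := by
        intro acc'
        rw [ih acc' (s + 1) (y + square_size + y_offset)]
        congr 1
        apply List.flatMap_congr
        intro p _
        by_cases hp : p.2 > 0
        · simp only [hp, if_pos]
          congr 1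
          funext j
          congr 1
          ring
        · simp [hp]
      by_cases h0 : row = 0
      · subst h0
        rw [if_pos rfl, hrest acc]
        norm_num
      · rw [if_neg h0, hrest, pv_inner_fold]
        by_cases hpos : row > 0
        · rw [if_pos hpos, List.append_assoc]
          congr 2
          rw [PySem.List.pyRange_one, List.map_map]
          simp only [List.length_map, List.length_range]
          apply List.map_congr_left
          intro k _
          simp only [Function.comp, Prod.mk.injEq]
          constructor
          · ring
          · ring
        · rw [if_neg hpos]
          have hnil : PySem.List.pyRange 0 row 1 = [] :=
            PySem.List.pyRange_one_eq_nil (by omega)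
          simp [hnil]

-- B's stage-1 memo loop: what the cache answers for any key.
lemma pv_cache_get? (f : Int → List Int) :
    ∀ (l : List Int) (d : PySem.Dict Int (List Int)) (k : Int),
      (l.foldl (fun d row => if d.contains row then d else d.insert row (f row)) d).get? k
        = (d.get? k).or (if k ∈ l then some (f k) else none) := by
  intro l
  induction l with
  | nil => intro d k; simp
  | cons r t ih =>
      intro d k
      simp only [List.foldl_cons]
      rw [ih]
      by_cases hc : d.contains r
      · rw [if_pos hc]
        by_cases hk : k = r
        · subst hk
          rw [PySem.Dict.contains_eq_isSome_get?] at hc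
          obtain ⟨v, hv⟩ := Option.isSome_iff_exists.mp hc
          simp [hv]
        · simp [hk]
      · rw [if_neg hc]
        by_cases hk : k = r
        · subst hk
          have hnone : d.get? k = none := by
            rw [PySem.Dict.contains_eq_isSome_get?] at hc
            exact Option.not_isSome_iff_eq_none.mp (by simp [hc])
          simp [PySem.Dict.get?_insert_self, hnone]
        · rw [PySem.Dict.get?_insert_of_ne _ _ hk]
          simp [hk]

-- B's stage-2 assembly loop is a flatMap.
lemma pv_assemble_fold {α β : Type} (g : α → List β) :
    ∀ (l : List α) (acc : List β),
      (l.foldl (fun out p => out ++ g p) acc) = acc ++ l.flatMap g := by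
  intro l
  induction l with
  | nil => intro acc; simp
  | cons h t ih => intro acc; simp [ih, List.flatMap_cons]

-- ===== VERDICT (by name: the statement is the Claim_ definition above) =====
theorem generate_square_coordinates_spec : Claim_equal_generate_square_coordinates := by
  intro canvas_size square_size pattern _ _
  unfold Spec_generate_square_coordinates
  simp only [generate_square_coordinates, generate_square_coordinates_alt]
  rw [pv_outer_fold canvas_size square_size _ pattern []
      0 (PySem.Int.floordiv (canvas_size.2 - (pattern.length : Int) * square_size) ((pattern.length : Int) + 1))]
  rw [pv_assemble_fold]
  simp only [List.nil_append]
  apply List.flatMap_congr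
  intro p hp
  have hmem : p.2 ∈ pattern := by
    rw [PySem.List.mem_enumerate_iff] at hp
    obtain ⟨k, hk, rfl⟩ := hp
    exact List.getElem_mem hk
  have hcache :
      (pattern.foldl (fun d row =>
        if d.contains row then d
        else if row > 0 then
          d.insert row ((PySem.List.pyRange 0 row 1).map
            (fun j => PySem.Int.floordiv (canvas_size.1 - row * square_size) (row + 1) +
              j * (square_size + PySem.Int.floordiv (canvas_size.1 - row * square_size) (row + 1))))
        else d.insert row []) PySem.Dict.empty : PySem.Dict Int (List Int)).getD p.2 []
      = (if p.2 > 0 then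
          (PySem.List.pyRange 0 p.2 1).map
            (fun j => PySem.Int.floordiv (canvas_size.1 - p.2 * square_size) (p.2 + 1) +
              j * (square_size + PySem.Int.floordiv (canvas_size.1 - p.2 * square_size) (p.2 + 1)))
        else []) := by
    have hstep : (fun (d : PySem.Dict Int (List Int)) (row : Int) =>
        if d.contains row then d
        else if row > 0 then
          d.insert row ((PySem.List.pyRange 0 row 1).map
            (fun j => PySem.Int.floordiv (canvas_size.1 - row * square_size) (row + 1) +
              j * (square_size + PySem.Int.floordiv (canvas_size.1 - row * square_size) (row + 1))))
        else d.insert row [])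
      = (fun (d : PySem.Dict Int (List Int)) (row : Int) =>
        if d.contains row then d
        else d.insert row (if row > 0 then
          (PySem.List.pyRange 0 row 1).map
            (fun j => PySem.Int.floordiv (canvas_size.1 - row * square_size) (row + 1) +
              j * (square_size + PySem.Int.floordiv (canvas_size.1 - row * square_size) (row + 1)))
          else [])) := by
      funext d row
      by_cases h : row > 0 <;> simp [h]
    rw [hstep, PySem.Dict.getD_eq_get?_getD, pv_cache_get?]
    simp [hmem]
  rw [hcache]
  by_cases hpos : p.2 > 0
  · simp only [hpos, if_pos, List.map_map]
    apply List.map_congr_left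
    intro j _
    simp only [Function.comp, Prod.mk.injEq]
    constructor
    · trivial
    · ring
  · simp [hpos]
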